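-- pv_equiv track=rewrite | github.com/Michael-Mbajwa/coding_challenges | non_adj_sum.py | non_adj_sum
-- ===== SOURCE A (Python) =====
-- def non_adj_sum(arr):
--     """
--     Given a list of integers, write a function that returns the largest sum of non-adjacent numbers.
--     Numbers can be 0 or negative.
--
--     For example, [2, 4, 6, 2, 5] should return 13, since we pick 2, 6, and 5. [5, 1, 1, 5] should return 10,
--     since we pick 5 and 5.
--
--     Follow-up: Can you do this in O(N) time and constant space?
--     """
--     sums = set()
--     for i in range(len(arr)):
--         n = 2
--         while n < len(arr):
--             if len(arr[i::n]) > 1: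
--                 sums.add(sum(arr[i::n]))
--             n += 1
--     return max(sums)
-- ===== SOURCE B (Python) =====
-- def non_adj_sum(arr):
--     # One pass of suffix sums per stride n: suf[i] = sum(arr[i::n]), computed
--     # right-to-left in O(N) per n, instead of slicing+summing per (i, n).
--     N = len(arr)
--     best = None
--     for n in range(2, N):
--         suf = [0] * N
--         for i in range(N - 1, -1, -1):
--             suf[i] = arr[i] + (suf[i + n] if i + n < N else 0)
--         for i in range(N - n):  # exactly the slices with more than one element
--             s = suf[i]
--             if best is None or s > best:
--                 best = s
--     return best
-- ===== Notes on version B (the rewrite author's own statement) =====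
-- stated objective: faster
-- what changed: Instead of materialising and summing every strided slice arr[i::n] into a set and taking max(set), B computes for each stride n a suffix-sum array suf[i]=sum(arr[i::n]) in one right-to-left pass and keeps a running maximum over the valid (len>1) slices.
import Mathlib
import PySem

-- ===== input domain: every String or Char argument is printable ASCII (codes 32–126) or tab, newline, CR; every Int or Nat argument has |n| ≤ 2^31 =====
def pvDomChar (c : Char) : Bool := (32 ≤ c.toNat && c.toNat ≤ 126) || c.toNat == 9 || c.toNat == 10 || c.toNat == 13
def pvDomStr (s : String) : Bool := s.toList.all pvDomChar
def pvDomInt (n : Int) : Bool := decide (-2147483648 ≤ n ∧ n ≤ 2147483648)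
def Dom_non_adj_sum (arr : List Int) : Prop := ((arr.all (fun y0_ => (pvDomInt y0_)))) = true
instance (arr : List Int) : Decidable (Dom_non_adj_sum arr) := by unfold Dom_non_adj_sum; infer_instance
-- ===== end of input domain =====

-- B replaces A's per-(i,n) slice-and-sum into a set with one right-to-left suffix-sum pass
-- per stride n and a running maximum (objective: faster; measured faster in a timing run).

-- ===== PORT A =====
-- the 'while n < len(arr)' loop of A, n incremented by 1 each turn
def nasWhile (arr : List Int) (i : Int) (n : Int) (sums : PySem.Set Int) : PySem.Set Int :=
  if h : n < PySem.List.len arr then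
    let sl := (PySem.List.slice? arr (some i) none n).getD []
    nasWhile arr i (n + 1)
      (if PySem.List.len sl > 1 then PySem.Set.add sums sl.sum else sums)
  else sums
termination_by (PySem.List.len arr - n).toNat
decreasing_by simp only [PySem.List.len_eq] at h ⊢; omega

def non_adj_sum (arr : List Int) : Int :=
  let sums := (PySem.List.pyRange 0 (PySem.List.len arr) 1).foldl
    (fun sums i => nasWhile arr i 2 sums) PySem.Set.empty
  (PySem.List.max? sums (fun x => x)).getD 0   -- max(sums); Python raises ValueError on the empty set, excluded by Pre_

-- ===== PORT B =====
def non_adj_sum_alt (arr : List Int) : Int :=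
  let N := PySem.List.len arr
  let best : Option Int := (PySem.List.pyRange 2 N 1).foldl (fun best n =>
    let suf := (PySem.List.pyRange (N - 1) (-1) (-1)).foldl
      (fun suf i => PySem.List.pySetD suf i
        (PySem.List.pyGetD arr i 0 + (if i + n < N then PySem.List.pyGetD suf (i + n) 0 else 0)))
      (List.replicate arr.length 0)
    (PySem.List.pyRange 0 (N - n) 1).foldl (fun best i =>
      let s := PySem.List.pyGetD suf i 0
      match best with
      | none => some s
      | some b => if s > b then some s else some b) best) none
  best.getD 0   -- best is None only when len(arr) < 3, excluded by Pre_

-- ===== PRECONDITION & SPEC =====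
-- A raises ValueError (max() of an empty set) exactly when len(arr) < 3; those inputs are excluded.
def Pre_non_adj_sum (arr : List Int) : Prop := 3 ≤ arr.length
instance (arr : List Int) : Decidable (Pre_non_adj_sum arr) := by unfold Pre_non_adj_sum; infer_instance
def pvWitness_non_adj_sum : List Int := [2, 4, 6, 2, 5]

def Spec_non_adj_sum (arr : List Int) (out : Int) : Prop := out = non_adj_sum_alt arr
instance (arr : List Int) (out : Int) : Decidable (Spec_non_adj_sum arr out) := by unfold Spec_non_adj_sum; infer_instance

-- ===== CLAIM (what is proved, stated in full; the proofs are below) =====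
def Claim_equal_non_adj_sum : Prop := ∀ (arr : List Int), Dom_non_adj_sum arr → Pre_non_adj_sum arr → Spec_non_adj_sum arr (non_adj_sum arr)

-- ===== LEMMAS AND PROOFS =====

-- the residue chain arr[i::n] as a list (proof-side characterisation of both ports)
def chainL (arr : List Int) (i n : Int) : List Int :=
  if h : 0 ≤ i ∧ i < (arr.length : Int) then
    arr[i.toNat]'(by omega) :: (if 1 ≤ n then chainL arr (i + n) n else [])
  else []
termination_by (arr.length - i.toNat)
decreasing_by omega

def chainSum (arr : List Int) (i n : Int) : Int := (chainL arr i n).sum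

-- the candidate values both programs maximise over
def Cand (arr : List Int) (v : Int) : Prop :=
  ∃ n i : Int, 2 ≤ n ∧ n < (arr.length : Int) ∧ 0 ≤ i ∧ i + n < (arr.length : Int) ∧
    v = chainSum arr i n

theorem chainL_cons (arr : List Int) (i n : Int) (h1 : 0 ≤ i) (h2 : i < (arr.length : Int)) (hn : 1 ≤ n) :
    chainL arr i n = arr[i.toNat]'(by omega) :: chainL arr (i + n) n := by
  rw [chainL]; simp [h1, h2, hn]

theorem chainL_nil (arr : List Int) (i n : Int) (h : ¬ (0 ≤ i ∧ i < (arr.length : Int))) :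
    chainL arr i n = [] := by
  rw [chainL]; simp [h]

theorem chainL_eq_nil_iff (arr : List Int) (i n : Int) (hn : 1 ≤ n) :
    chainL arr i n = [] ↔ ¬ (0 ≤ i ∧ i < (arr.length : Int)) := by
  constructor
  · intro he h
    rw [chainL_cons arr i n h.1 h.2 hn] at he
    exact List.cons_ne_nil _ _ he
  · exact chainL_nil arr i n

theorem chainL_len_gt_one (arr : List Int) (i n : Int) (hi : 0 ≤ i) (hn : 1 ≤ n) :
    ((chainL arr i n).length > 1 ↔ i + n < (arr.length : Int)) := by
  by_cases h2 : i < (arr.length : Int)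
  · rw [chainL_cons arr i n hi h2 hn]
    simp only [List.length_cons, gt_iff_lt]
    constructor
    · intro h
      have hne : chainL arr (i+n) n ≠ [] := by
        intro he; simp [he] at h
      have h3 : ¬ ¬ (0 ≤ i + n ∧ i + n < (arr.length : Int)) :=
        fun hc => hne ((chainL_eq_nil_iff arr (i+n) n hn).mpr hc)
      push Not at h3
      exact h3.2
    · intro h
      have : chainL arr (i+n) n ≠ [] := by
        intro he
        have := (chainL_eq_nil_iff arr (i+n) n hn).mp he
        push Not at this
        omega
      have := List.length_pos_iff.mpr this
      omega
  · rw [chainL_nil arr i n (by omega)]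
    simp; omega

theorem chainSum_rec (arr : List Int) (i n : Int) (hi : 0 ≤ i) (hilt : i < (arr.length : Int)) (hn : 1 ≤ n) :
    chainSum arr i n = PySem.List.pyGetD arr i 0 +
      (if i + n < (arr.length : Int) then chainSum arr (i + n) n else 0) := by
  unfold chainSum
  rw [chainL_cons arr i n hi hilt hn, List.sum_cons,
      PySem.List.pyGetD_eq_getElem (xs := arr) (d := 0) hi (by simpa using hilt)]
  congr 1
  split
  · rfl
  · rw [chainL_nil arr (i+n) n (by omega)]; rfl

-- bridge: the strided slice arr[i::n], as PySem computes it, IS the chain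
theorem slice_norm (arr : List Int) (i n : Int) (hi : 0 ≤ i) (hn : 0 < n) :
    (PySem.List.slice? arr (some i) none n).getD [] =
      (List.range (if min i (arr.length:Int) < (arr.length:Int)
          then (((arr.length:Int) - min i (arr.length:Int) + n - 1)/n).toNat else 0)).filterMap
        (fun (k : Nat) => arr[(min i (arr.length:Int) + n*(k:Int)).toNat]?) := by
  simp only [PySem.List.slice?, PySem.List.sliceIndices]
  rw [if_neg (by omega), if_neg (by omega : ¬ n < 0), if_neg (by omega : ¬ i < 0)]
  simp only [if_neg (by omega : ¬ n < 0), if_pos hn, Option.getD_some]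

theorem slice_chain_aux (arr : List Int) (n : Int) (hn : 0 < n) :
    ∀ (k : Nat) (i : Int), 0 ≤ i → (arr.length : Int) - i ≤ k →
    (PySem.List.slice? arr (some i) none n).getD [] = chainL arr i n := by
  intro k
  induction k with
  | zero =>
    intro i hi hk
    rw [slice_norm arr i n hi hn, chainL_nil arr i n (by omega)]
    rw [min_eq_right (by omega : (arr.length:Int) ≤ i), if_neg (by omega)]
    rfl
  | succ k ih =>
    intro i hi hk
    by_cases hlt : i < (arr.length : Int)
    · rw [slice_norm arr i n hi hn, chainL_cons arr i n hi hlt (by omega)]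
      rw [min_eq_left (by omega : i ≤ (arr.length:Int)), if_pos hlt]
      have hq1 : 1 ≤ ((arr.length:Int) - i + n - 1) / n := by
        rw [← PySem.Int.floordiv_eq_ediv_of_pos hn, PySem.Int.le_floordiv_iff_mul_le hn]
        omega
      have hcnt : (((arr.length:Int) - i + n - 1) / n).toNat
          = ((((arr.length:Int) - i + n - 1) / n - 1).toNat) + 1 := by omega
      rw [hcnt, List.range_succ_eq_map, List.filterMap_cons, List.filterMap_map]
      have h0 : arr[(i + n * ((0:Nat):Int)).toNat]? = some (arr[i.toNat]'(by omega)) := by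
        simp only [Nat.cast_zero, mul_zero, add_zero]
        exact List.getElem?_eq_getElem (by omega)
      rw [h0]
      simp only []
      congr 1
      rw [← ih (i + n) (by omega) (by omega)]
      rw [slice_norm arr (i+n) n (by omega) hn]
      by_cases hin : i + n < (arr.length : Int)
      · rw [min_eq_left (by omega), if_pos hin]
        have hstep : ((arr.length:Int) - i + n - 1) / n - 1 = ((arr.length:Int) - (i+n) + n - 1) / n := by
          have := Int.add_mul_ediv_right ((arr.length:Int) - (i+n) + n - 1) 1 (by omega : n ≠ 0)
          have harg : (arr.length:Int) - i + n - 1 = ((arr.length:Int) - (i+n) + n - 1) + 1 * n := by ring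
          rw [harg, this]
          omega
        rw [hstep]
        apply List.filterMap_congr
        intro x _
        simp only [Function.comp]
        congr 2
        push_cast
        ring
      · rw [min_eq_right (by omega), if_neg (by omega)]
        have hq : ((arr.length:Int) - i + n - 1) / n = 1 := by
          rw [← PySem.Int.floordiv_eq_ediv_of_pos hn,
              PySem.Int.floordiv_eq_iff_of_pos hn]
          constructor <;> omega
        rw [hq]
        rfl
    · rw [slice_norm arr i n hi hn, chainL_nil arr i n (by omega)]
      rw [min_eq_right (by omega : (arr.length:Int) ≤ i), if_neg (by omega)]
      rfl

theorem slice_eq_chain (arr : List Int) (i n : Int) (hi : 0 ≤ i) (hn : 0 < n) :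
    (PySem.List.slice? arr (some i) none n).getD [] = chainL arr i n :=
  slice_chain_aux arr n hn arr.length i hi (by omega)

-- A-side: membership in the set built by the while loop
theorem mem_nasWhile (arr : List Int) (i : Int) :
    ∀ (n0 : Int) (s : PySem.Set Int) (v : Int),
    v ∈ nasWhile arr i n0 s ↔ v ∈ s ∨ ∃ n : Int, n0 ≤ n ∧ n < (arr.length : Int) ∧
      PySem.List.len ((PySem.List.slice? arr (some i) none n).getD []) > 1 ∧
      v = ((PySem.List.slice? arr (some i) none n).getD []).sum := by
  intro n0 s v
  fun_induction nasWhile arr i n0 s with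
  | case1 n s h sl ih =>
    simp only [dite_eq_ite] at ih
    rw [ih]
    simp only [PySem.List.len_eq] at h
    constructor
    · rintro (hmem | ⟨m, hm⟩)
      · split at hmem
        · rcases (PySem.Set.mem_add _ _ _).mp hmem with hmem | rfl
          · exact Or.inl hmem
          · exact Or.inr ⟨n, le_refl n, h, by assumption, rfl⟩
        · exact Or.inl hmem
      · exact Or.inr ⟨m, by omega, hm.2.1, hm.2.2⟩
    · rintro (hmem | ⟨m, hm1, hm2, hm3, hm4⟩)
      · left
        split
        · exact (PySem.Set.mem_add _ _ _).mpr (Or.inl hmem)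
        · exact hmem
      · by_cases hmn : m = n
        · subst hmn
          left
          rw [if_pos hm3]
          exact (PySem.Set.mem_add _ _ _).mpr (Or.inr hm4)
        · exact Or.inr ⟨m, by omega, hm2, hm3, hm4⟩
  | case2 n s h =>
    simp only [PySem.List.len_eq] at h
    constructor
    · exact Or.inl
    · rintro (hmem | ⟨m, hm⟩)
      · exact hmem
      · omega

theorem mem_foldl_grow {α : Type} (l : List α) (step : PySem.Set Int → α → PySem.Set Int)
    (P : α → Int → Prop) (h : ∀ s x v, v ∈ step s x ↔ v ∈ s ∨ P x v) :
    ∀ (init : PySem.Set Int) (v : Int), v ∈ l.foldl step init ↔ v ∈ init ∨ ∃ x ∈ l, P x v := by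
  induction l with
  | nil => intro init v; simp
  | cons a l ih =>
    intro init v
    rw [List.foldl_cons, ih, h]
    constructor
    · rintro (( hv | hp ) | ⟨x, hx, hp⟩)
      · exact Or.inl hv
      · exact Or.inr ⟨a, List.mem_cons_self, hp⟩
      · exact Or.inr ⟨x, List.mem_cons_of_mem a hx, hp⟩
    · rintro (hv | ⟨x, hx, hp⟩)
      · exact Or.inl (Or.inl hv)
      · rcases List.mem_cons.mp hx with rfl | hx
        · exact Or.inl (Or.inr hp)
        · exact Or.inr ⟨x, hx, hp⟩

-- A-side: the final set holds exactly the candidate values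
theorem mem_A_sums (arr : List Int) (v : Int) :
    v ∈ (PySem.List.pyRange 0 (PySem.List.len arr) 1).foldl
      (fun sums i => nasWhile arr i 2 sums) PySem.Set.empty ↔ Cand arr v := by
  rw [mem_foldl_grow _ _
    (fun i v => ∃ n : Int, 2 ≤ n ∧ n < (arr.length : Int) ∧
      PySem.List.len ((PySem.List.slice? arr (some i) none n).getD []) > 1 ∧
      v = ((PySem.List.slice? arr (some i) none n).getD []).sum)
    (fun s i v => mem_nasWhile arr i 2 s v)]
  simp only [PySem.List.len_eq, PySem.Set.empty, List.not_mem_nil, false_or]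
  constructor
  · rintro ⟨i, hi, n, hn2, hnN, hcond, hval⟩
    have hir := PySem.List.mem_pyRange_one.mp hi
    rw [slice_eq_chain arr i n (by omega) (by omega)] at hcond hval
    refine ⟨n, i, hn2, hnN, by omega, ?_, by simpa [chainSum] using hval⟩
    have := (chainL_len_gt_one arr i n (by omega) (by omega)).mp (by exact_mod_cast hcond)
    exact this
  · rintro ⟨n, i, hn2, hnN, hi0, hinN, rfl⟩
    refine ⟨i, PySem.List.mem_pyRange_one.mpr ⟨hi0, by omega⟩, n, hn2, hnN, ?_, ?_⟩
    · rw [slice_eq_chain arr i n hi0 (by omega)]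
      exact_mod_cast (chainL_len_gt_one arr i n hi0 (by omega)).mpr hinN
    · rw [slice_eq_chain arr i n hi0 (by omega)]
      rfl

-- B-side: the running-maximum step
def umaxStep : Option Int → Int → Option Int := fun b s =>
  match b with
  | none => some s
  | some v => if s > v then some s else some v

theorem umaxStep_some (v s : Int) : umaxStep (some v) s = some (max v s) := by
  simp only [umaxStep, max_def]
  split <;> split <;> simp_all <;> omega

theorem umax_fold_some_eq (L : List Int) : ∀ v : Int, L.foldl umaxStep (some v) = some (L.foldl max v) := by
  induction L with
  | nil => intro v; rfl
  | cons a L ih =>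
    intro v
    simp only [List.foldl_cons, umaxStep_some]
    exact ih (max v a)

theorem umax_fold_cons (a : Int) (L : List Int) :
    (a :: L).foldl umaxStep none = some (L.foldl max a) := by
  simp only [List.foldl_cons]
  exact umax_fold_some_eq L a

theorem foldl_flat (g : Int → List Int) : ∀ (l : List Int) (b : Option Int),
    l.foldl (fun b n => (g n).foldl umaxStep b) b = (l.flatMap g).foldl umaxStep b := by
  intro l
  induction l with
  | nil => intro b; rfl
  | cons a l ih =>
    intro b
    simp only [List.foldl_cons, List.flatMap_cons, List.foldl_append]
    exact ih _

-- B-side: pySetD facts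
theorem pySetD_len (s : List Int) (i : Int) (v : Int) (h1 : 0 ≤ i) (h2 : i < (s.length:Int)) :
    (PySem.List.pySetD s i v).length = s.length := by
  have : i = ((i.toNat : Nat) : Int) := by omega
  rw [this, PySem.List.pySetD, PySem.List.pySet?_natCast s i.toNat v (by omega)]
  simp

theorem pyGetD_pySetD_self (s : List Int) (i : Int) (v : Int) (h1 : 0 ≤ i) (h2 : i < (s.length:Int)) :
    PySem.List.pyGetD (PySem.List.pySetD s i v) i 0 = v := by
  have hi : i = ((i.toNat : Nat) : Int) := by omega
  rw [hi, PySem.List.pySetD, PySem.List.pySet?_natCast s i.toNat v (by omega)]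
  simp only [Option.getD_some, PySem.List.pyGetD_natCast]
  rw [List.getD, List.getElem?_set_self', List.getElem?_eq_getElem (by omega)]
  rfl

theorem pyGetD_pySetD_ne (s : List Int) (i j : Int) (v : Int) (h1 : 0 ≤ i) (h2 : i < (s.length:Int))
    (h3 : 0 ≤ j) (hne : j ≠ i) :
    PySem.List.pyGetD (PySem.List.pySetD s i v) j 0 = PySem.List.pyGetD s j 0 := by
  have hi : i = ((i.toNat : Nat) : Int) := by omega
  have hj : j = ((j.toNat : Nat) : Int) := by omega
  rw [hi, hj, PySem.List.pySetD, PySem.List.pySet?_natCast s i.toNat v (by omega)]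
  simp only [Option.getD_some, PySem.List.pyGetD_natCast]
  rw [List.getD, List.getD, List.getElem?_set_ne (by omega)]

-- B-side: the suffix pass computes chainSum at every index
def stepB (arr : List Int) (n : Int) : List Int → Int → List Int := fun suf i =>
  PySem.List.pySetD suf i
    (PySem.List.pyGetD arr i 0 +
      (if i + n < PySem.List.len arr then PySem.List.pyGetD suf (i + n) 0 else 0))

theorem suf_aux (arr : List Int) (n : Int) (hn : 1 ≤ n) :
    ∀ (k : Nat) (j : Int) (s0 : List Int), j + 1 ≤ (k : Int) → j < (arr.length : Int) →
    s0.length = arr.length →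
    (∀ i : Int, j < i → 0 ≤ i → i < (arr.length : Int) → PySem.List.pyGetD s0 i 0 = chainSum arr i n) →
    ((PySem.List.pyRange j (-1) (-1)).foldl (stepB arr n) s0).length = arr.length ∧
    ∀ i : Int, 0 ≤ i → i < (arr.length : Int) →
      PySem.List.pyGetD ((PySem.List.pyRange j (-1) (-1)).foldl (stepB arr n) s0) i 0 = chainSum arr i n := by
  intro k
  induction k with
  | zero =>
    intro j s0 hk hj hlen hvals
    rw [PySem.List.pyRange_neg_one_eq_nil (by omega)]
    exact ⟨hlen, fun i h1 h2 => hvals i (by omega) h1 h2⟩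
  | succ k ih =>
    intro j s0 hk hj hlen hvals
    by_cases hj0 : j < 0
    · rw [PySem.List.pyRange_neg_one_eq_nil (by omega)]
      exact ⟨hlen, fun i h1 h2 => hvals i (by omega) h1 h2⟩
    · rw [PySem.List.pyRange_neg_one_cons (by omega), List.foldl_cons]
      have hjlen : j < (s0.length : Int) := by omega
      have hwrite : PySem.List.pyGetD (stepB arr n s0 j) j 0 = chainSum arr j n := by
        unfold stepB
        rw [pyGetD_pySetD_self s0 j _ (by omega) hjlen]
        rw [chainSum_rec arr j n (by omega) hj hn]
        simp only [PySem.List.len_eq]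
        congr 1
        split
        · exact hvals (j + n) (by omega) (by omega) (by omega)
        · rfl
      have hlen' : (stepB arr n s0 j).length = arr.length := by
        unfold stepB
        rw [pySetD_len s0 j _ (by omega) hjlen]
        exact hlen
      apply ih (j - 1) (stepB arr n s0 j) (by omega) (by omega) hlen'
      intro i h1 h2 h3
      by_cases hij : i = j
      · subst hij; exact hwrite
      · unfold stepB
        rw [pyGetD_pySetD_ne s0 j i _ (by omega) hjlen h2 hij]
        exact hvals i (by omega) h2 h3

-- B-side: the inner suffix array, named for the proofs
def sufL (arr : List Int) (n : Int) : List Int :=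
  (PySem.List.pyRange ((arr.length : Int) - 1) (-1) (-1)).foldl (stepB arr n)
    (List.replicate arr.length 0)

theorem B_outer_eq (arr : List Int) : non_adj_sum_alt arr =
    (((PySem.List.pyRange 2 ((arr.length : Int)) 1).flatMap
        (fun n => (PySem.List.pyRange 0 ((arr.length : Int) - n) 1).map
          (fun i => PySem.List.pyGetD (sufL arr n) i 0))).foldl umaxStep none).getD 0 := by
  unfold non_adj_sum_alt sufL stepB
  simp only [PySem.List.len_eq]
  rw [← foldl_flat]
  congr 1
  congr 1
  funext b n
  rw [List.foldl_map]
  rfl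

-- ===== VERDICT (by name: the statement is the Claim_ definition above) =====
theorem non_adj_sum_spec : Claim_equal_non_adj_sum := by
  intro arr _hDom hPre
  unfold Pre_non_adj_sum at hPre
  unfold Spec_non_adj_sum
  -- A's result is the max of the candidate set
  have hA : non_adj_sum arr =
      (PySem.List.max? ((PySem.List.pyRange 0 (PySem.List.len arr) 1).foldl
        (fun sums i => nasWhile arr i 2 sums) PySem.Set.empty) (fun x => x)).getD 0 := rfl
  set S := (PySem.List.pyRange 0 (PySem.List.len arr) 1).foldl
      (fun sums i => nasWhile arr i 2 sums) PySem.Set.empty with hSdef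
  have hc0 : Cand arr (chainSum arr 0 2) := ⟨2, 0, by omega, by omega, by omega, by omega, rfl⟩
  have hmem0 : chainSum arr 0 2 ∈ S := (mem_A_sums arr _).mpr hc0
  obtain ⟨m, hm⟩ : ∃ m, PySem.List.max? S (fun x => x) = some m := by
    cases h : PySem.List.max? S (fun x => x) with
    | none =>
      rw [PySem.List.max?_eq_none_iff] at h
      rw [h] at hmem0
      exact absurd hmem0 (List.not_mem_nil)
    | some m => exact ⟨m, rfl⟩
  -- B's result is the running max over the flattened candidate list
  have hsuf : ∀ n : Int, 1 ≤ n → ∀ i : Int, 0 ≤ i → i < (arr.length : Int) →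
      PySem.List.pyGetD (sufL arr n) i 0 = chainSum arr i n := by
    intro n hn
    exact (suf_aux arr n hn arr.length ((arr.length : Int) - 1) (List.replicate arr.length 0)
      (by omega) (by omega) (by simp)
      (fun i h1 h2 h3 => absurd h3 (by omega))).2
  set Lall := (PySem.List.pyRange 2 ((arr.length : Int)) 1).flatMap
      (fun n => (PySem.List.pyRange 0 ((arr.length : Int) - n) 1).map
        (fun i => PySem.List.pyGetD (sufL arr n) i 0)) with hLdef
  have hLmem : ∀ v : Int, v ∈ Lall ↔ Cand arr v := by
    intro v
    rw [hLdef, List.mem_flatMap]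
    constructor
    · rintro ⟨n, hn, hv⟩
      rcases List.mem_map.mp hv with ⟨i, hi, rfl⟩
      have hnr := PySem.List.mem_pyRange_one.mp hn
      have hir := PySem.List.mem_pyRange_one.mp hi
      rw [hsuf n (by omega) i (by omega) (by omega)]
      exact ⟨n, i, by omega, by omega, by omega, by omega, rfl⟩
    · rintro ⟨n, i, h1, h2, h3, h4, rfl⟩
      exact ⟨n, PySem.List.mem_pyRange_one.mpr ⟨h1, h2⟩,
        List.mem_map.mpr ⟨i, PySem.List.mem_pyRange_one.mpr ⟨h3, by omega⟩,
          hsuf n (by omega) i h3 (by omega)⟩⟩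
  have hmem0' : chainSum arr 0 2 ∈ Lall := (hLmem _).mpr hc0
  obtain ⟨a, L', hL⟩ : ∃ a L', Lall = a :: L' := by
    cases hcase : Lall with
    | nil => rw [hcase] at hmem0'; exact absurd hmem0' (List.not_mem_nil)
    | cons a L' => exact ⟨a, L', rfl⟩
  have hBval : non_adj_sum_alt arr = L'.foldl max a := by
    rw [B_outer_eq, ← hLdef, hL, umax_fold_cons]
    rfl
  set m' := L'.foldl max a with hm'def
  have hub : ∀ v ∈ Lall, v ≤ m' := by
    rw [hL]
    intro v hv
    rcases List.mem_cons.mp hv with rfl | hv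
    · exact (PySem.List.le_foldl_max L' v).1
    · exact (PySem.List.le_foldl_max L' a).2 v hv
  have hm'mem : m' ∈ Lall := by
    rw [hL]
    rcases PySem.List.foldl_max_mem L' a with h | h
    · rw [hm'def, h]; exact List.mem_cons_self
    · exact List.mem_cons_of_mem a h
  have hmmem : m ∈ S := PySem.List.max?_mem hm
  have hmub : ∀ y ∈ S, y ≤ m := PySem.List.max?_isMax hm
  have h1 : m ≤ m' := hub m ((hLmem m).mpr ((mem_A_sums arr m).mp hmmem))
  have h2 : m' ≤ m := hmub m' ((mem_A_sums arr m').mpr ((hLmem m').mp hm'mem))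
  rw [hA, hm, hBval]
  simp only [Option.getD_some]
  omega
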